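-- pv_equiv track=rewrite | github.com/fengguokeji/XHS_Downloader_Android | api/xhs_downloader_api/xhs.py | _is_valid_media_url
-- ===== SOURCE A (Python) =====
-- from typing import Any, Dict, Iterable, List, Optional, Tuple
--
-- def _is_valid_media_url(url: Optional[str]) -> bool:
--     if not isinstance(url, str):
--         return False
--     lower = url.lower()
--     return any(
--         ext in lower
--         for ext in (
--             ".jpg",
--             ".jpeg",
--             ".png",
--             ".gif",
--             ".mp4",
--             ".webm",
--             "xhscdn.com",
--             "xiaohongshu.com",
--         )
--     )
-- ===== SOURCE B (Python) =====
-- from typing import Optional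
--
-- _PATTERNS = (
--     ".jpg",
--     ".jpeg",
--     ".png",
--     ".gif",
--     ".mp4",
--     ".webm",
--     "xhscdn.com",
--     "xiaohongshu.com",
-- )
--
-- def _is_valid_media_url(url: Optional[str]) -> bool:
--     # Single left-to-right scan: at each position, test whether any pattern
--     # starts there, instead of running eight independent substring searches.
--     if not isinstance(url, str):
--         return False
--     lower = url.lower()
--     for i in range(len(lower) + 1):
--         if any(lower.startswith(p, i) for p in _PATTERNS):
--             return True
--     return False
-- ===== Notes on version B (the rewrite author's own statement) =====
-- stated objective: alternative
-- what changed: A tests each of the eight patterns with a separate substring search; B makes one left-to-right scan over the positions of the lowercased URL, testing at each position whether any pattern starts there.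
import Mathlib
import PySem

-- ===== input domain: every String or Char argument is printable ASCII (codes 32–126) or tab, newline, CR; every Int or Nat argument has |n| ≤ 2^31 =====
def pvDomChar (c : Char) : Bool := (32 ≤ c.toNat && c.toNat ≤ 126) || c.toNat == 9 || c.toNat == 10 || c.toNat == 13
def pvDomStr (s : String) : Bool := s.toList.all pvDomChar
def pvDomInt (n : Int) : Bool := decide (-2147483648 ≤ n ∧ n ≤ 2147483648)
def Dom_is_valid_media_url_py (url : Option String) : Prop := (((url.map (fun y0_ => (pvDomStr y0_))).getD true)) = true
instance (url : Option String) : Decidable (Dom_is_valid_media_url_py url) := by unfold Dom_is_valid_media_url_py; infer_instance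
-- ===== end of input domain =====

-- B replaces A's eight independent substring searches with one left-to-right
-- scan over the positions of the lowercased URL (objective: alternative).


-- ===== PORT A =====
-- the literal tuple of patterns from A
def pvPats : List String :=
  [".jpg", ".jpeg", ".png", ".gif", ".mp4", ".webm", "xhscdn.com", "xiaohongshu.com"]

def is_valid_media_url_py (url : Option String) : Bool :=
  match url with
  | none => false                      -- not isinstance(url, str)
  | some s =>
    let lower := PySem.Str.lower s
    pvPats.any (fun ext => PySem.Str.isIn ext lower)   -- any(ext in lower for ext ...)

-- ===== PORT B =====
-- B's own copy of the pattern tuple (Source B's _PATTERNS)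
def pvAltPats : List String :=
  [".jpg", ".jpeg", ".png", ".gif", ".mp4", ".webm", "xhscdn.com", "xiaohongshu.com"]

-- Source B's loop 'for i in range(len(lower)+1)': one scan over the suffixes of
-- the lowercased URL; at each position test whether some pattern starts there
-- (lower.startswith(p, i)).  Includes the final empty suffix (i = len).
def pvAltScan (cs : List Char) : Bool :=
  match cs with
  | [] => pvAltPats.any (fun p => PySem.Chars.startswith [] p.toList)
  | c :: t =>
    if pvAltPats.any (fun p => PySem.Chars.startswith (c :: t) p.toList) then true
    else pvAltScan t

def is_valid_media_url_py_alt (url : Option String) : Bool :=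
  match url with
  | none => false
  | some s => pvAltScan (PySem.Str.lower s).toList

-- ===== PRECONDITION & SPEC =====
def Spec_is_valid_media_url_py (url : Option String) (out : Bool) : Prop := out = is_valid_media_url_py_alt url
instance (url : Option String) (out : Bool) : Decidable (Spec_is_valid_media_url_py url out) := by unfold Spec_is_valid_media_url_py; infer_instance

-- ===== CLAIM (what is proved, stated in full; the proofs are below) =====
def Claim_equal_is_valid_media_url_py : Prop := ∀ (url : Option String), Dom_is_valid_media_url_py url → Spec_is_valid_media_url_py url (is_valid_media_url_py url)

-- ===== LEMMAS AND PROOFS =====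
-- The position scan finds a pattern iff some pattern is an infix.
theorem pvAltScan_iff (cs : List Char) :
    pvAltScan cs = true ↔ ∃ p ∈ pvAltPats, p.toList <:+: cs := by
  induction cs with
  | nil =>
    simp [pvAltScan, List.any_eq_true, PySem.Chars.startswith_iff]
  | cons c t ih =>
    simp only [pvAltScan]
    split_ifs with h
    · simp only [List.any_eq_true, PySem.Chars.startswith_iff] at h
      obtain ⟨p, hp, hpre⟩ := h
      simp only [true_iff]
      exact ⟨p, hp, hpre.isInfix⟩
    · simp only [List.any_eq_true, PySem.Chars.startswith_iff, not_exists, not_and] at h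
      rw [ih]
      constructor
      · rintro ⟨p, hp, hinf⟩
        exact ⟨p, hp, hinf.trans (List.suffix_cons c t).isInfix⟩
      · rintro ⟨p, hp, hinf⟩
        rcases List.infix_cons_iff.mp hinf with hpre | hinf'
        · exact absurd hpre (h p hp)
        · exact ⟨p, hp, hinf'⟩

-- ===== VERDICT (by name: the statement is the Claim_ definition above) =====
theorem is_valid_media_url_py_spec : Claim_equal_is_valid_media_url_py := by
  intro url _
  unfold Spec_is_valid_media_url_py
  match url with
  | none => rfl
  | some s =>
    simp only [is_valid_media_url_py, is_valid_media_url_py_alt]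
    rw [Bool.eq_iff_iff, pvAltScan_iff]
    simp only [List.any_eq_true, PySem.Str.isIn_iff_infix]
    simp [PySem.Str.toList_lower, pvPats, pvAltPats]
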